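-- pv_equiv track=rewrite | github.com/PizaSukeruton/theexpanse | backend.bak.20251110215351/utils/knowledge_chunker.py | _coalesce_lines
-- ===== SOURCE A (Python) =====
-- def _coalesce_lines(lines):
--     paras, buf = [], []
--     for ln in lines:
--         if not ln.strip():
--             if buf:
--                 paras.append(" ".join(buf).strip())
--                 buf = []
--             continue
--         buf.append(ln.strip())
--         if ln.strip().endswith(('.', '?', '!', ':')) and len(" ".join(buf).split()) >= 15:
--             paras.append(" ".join(buf).strip())
--             buf = []
--     if buf:
--         paras.append(" ".join(buf).strip())
--     return paras
-- ===== SOURCE B (Python) =====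
-- def _coalesce_lines(lines):
--     # Pre-strip everything once, then extract each paragraph as a contiguous
--     # slice of the stripped lines: scan forward for the next boundary (a blank
--     # line or a punctuation-terminated line once the running word count reaches
--     # 15) and join the slice once.  No buffer/flush state is maintained.
--     stripped = [ln.strip() for ln in lines]
--     paras = []
--     i, n = 0, len(stripped)
--     while i < n:
--         if not stripped[i]:
--             i += 1
--             continue
--         j, words = i, 0
--         while j < n and stripped[j]:
--             words += len(stripped[j].split())
--             j += 1
--             if stripped[j - 1].endswith(('.', '?', '!', ':')) and words >= 15:
--                 break
--         paras.append(" ".join(stripped[i:j]))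
--         i = j
--     return paras
-- ===== Notes on version B (the rewrite author's own statement) =====
-- stated objective: alternative
-- what changed: B pre-strips all lines once, then extracts each paragraph as a contiguous index slice of the stripped lines by scanning forward for the next boundary (blank line, or punctuation-terminated line once a running word count reaches 15) and joining the slice once, instead of A's stateful buffer that is re-joined and re-split on every appended line.
import Mathlib
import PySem

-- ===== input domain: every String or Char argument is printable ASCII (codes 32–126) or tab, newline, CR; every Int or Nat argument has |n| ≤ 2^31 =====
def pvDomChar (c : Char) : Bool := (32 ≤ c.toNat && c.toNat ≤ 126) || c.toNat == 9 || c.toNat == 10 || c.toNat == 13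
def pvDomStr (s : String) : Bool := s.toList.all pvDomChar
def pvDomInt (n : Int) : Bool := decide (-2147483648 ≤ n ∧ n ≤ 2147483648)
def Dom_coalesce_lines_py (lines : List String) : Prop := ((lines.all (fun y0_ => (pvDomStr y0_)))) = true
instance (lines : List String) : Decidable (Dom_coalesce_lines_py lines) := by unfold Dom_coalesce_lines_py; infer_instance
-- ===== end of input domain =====

-- B pre-strips all lines once and extracts each paragraph as a contiguous slice ending at the
-- next boundary (blank line, or punctuation-terminated line with running word count ≥ 15),
-- instead of A's stateful buffer that is re-joined and re-split on every line (objective: alternative).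

-- ===== PORT A =====
-- loop body of A's `for ln in lines`, state = (paras, buf)
def pvStepA (st : List String × List String) (ln : String) : List String × List String :=
  let paras := st.1
  let buf := st.2
  if PySem.Str.strip ln == "" then
    if buf.isEmpty then (paras, buf)
    else (paras ++ [PySem.Str.strip (PySem.Str.join " " buf)], ([] : List String))
  else
    let buf1 := buf ++ [PySem.Str.strip ln]
    if (PySem.Str.endswith (PySem.Str.strip ln) "." || PySem.Str.endswith (PySem.Str.strip ln) "?" ||
        PySem.Str.endswith (PySem.Str.strip ln) "!" || PySem.Str.endswith (PySem.Str.strip ln) ":") &&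
       decide ((PySem.Str.split₀ (PySem.Str.join " " buf1)).length ≥ 15) then
      (paras ++ [PySem.Str.strip (PySem.Str.join " " buf1)], ([] : List String))
    else (paras, buf1)

def coalesce_lines_py (lines : List String) : List String :=
  let st := lines.foldl pvStepA ([], [])
  if st.2.isEmpty then st.1 else st.1 ++ [PySem.Str.strip (PySem.Str.join " " st.2)]

-- ===== PORT B =====
-- `stripped[j].endswith(('.', '?', '!', ':'))`
def pvEndsB (s : String) : Bool :=
  PySem.Str.endswith s "." || PySem.Str.endswith s "?" ||
  PySem.Str.endswith s "!" || PySem.Str.endswith s ":"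

-- B's inner `while` scan: starting at the suffix of stripped lines with running word count
-- `words`, return (the slice forming the current paragraph, the remaining suffix).
def pvTakePara : List String → Nat → List String × List String
  | [], _ => ([], [])
  | s :: rest, words =>
    if s == "" then ([], s :: rest)
    else
      let words1 := words + (PySem.Str.split₀ s).length
      if pvEndsB s && decide (words1 ≥ 15) then ([s], rest)
      else
        let p := pvTakePara rest words1
        (s :: p.1, p.2)

theorem pvTakePara_rem_le : ∀ (l : List String) (w : Nat), (pvTakePara l w).2.length ≤ l.length := by
  intro l
  induction l with
  | nil => intro w; simp [pvTakePara]
  | cons s rest ih =>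
    intro w
    simp only [pvTakePara]
    split_ifs with h1 h2
    · simp
    · simp
    · exact Nat.le_trans (ih _) (by simp)

-- B's outer `while i < n` loop over the stripped lines.
theorem pvTakePara_cons_rem (s : String) (rest : List String) (w : Nat)
    (h : ¬ (s == "") = true) : (pvTakePara (s :: rest) w).2.length < (s :: rest).length := by
  rw [pvTakePara, if_neg h]
  simp only []
  split_ifs with h2
  · simp
  · exact Nat.lt_succ_of_le (pvTakePara_rem_le _ _)

def pvBuild : List String → List String
  | [] => []
  | s :: rest =>
    if s == "" then pvBuild rest
    else
      let p := pvTakePara (s :: rest) 0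
      PySem.Str.join " " p.1 :: pvBuild p.2
termination_by l => l.length
decreasing_by
  · simp
  · exact pvTakePara_cons_rem s rest 0 (by assumption)

def coalesce_lines_py_alt (lines : List String) : List String :=
  pvBuild (lines.map PySem.Str.strip)

-- ===== PRECONDITION & SPEC =====
def Spec_coalesce_lines_py (lines : List String) (out : List String) : Prop := out = coalesce_lines_py_alt lines
instance (lines : List String) (out : List String) : Decidable (Spec_coalesce_lines_py lines out) := by unfold Spec_coalesce_lines_py; infer_instance

-- ===== CLAIM (what is proved, stated in full; the proofs are below) =====
def Claim_equal_coalesce_lines_py : Prop := ∀ (lines : List String), Dom_coalesce_lines_py lines → Spec_coalesce_lines_py lines (coalesce_lines_py lines)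

-- ===== LEMMAS AND PROOFS =====

-- a nonempty char list whose first and last characters are not whitespace
def pvNES (l : List Char) : Prop :=
  l ≠ [] ∧ (∀ c ∈ l.head?, PySem.Chars.isspace c = false) ∧
    (∀ c ∈ l.getLast?, PySem.Chars.isspace c = false)

theorem pv_lstrip_fix (l : List Char) (h : pvNES l) : PySem.Chars.lstrip l = l := by
  unfold PySem.Chars.lstrip
  rw [List.dropWhile_eq_self_iff]
  intro hl
  have := h.2.1 l[0] (by rw [List.head?_eq_getElem?]; simp)
  simp [this]

theorem pv_rstrip_fix (l : List Char) (h : pvNES l) : PySem.Chars.rstrip l = l := by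
  unfold PySem.Chars.rstrip
  have hne : l ≠ [] := h.1
  have hd : List.dropWhile PySem.Chars.isspace l.reverse = l.reverse := by
    rw [List.dropWhile_eq_self_iff]
    intro hl
    have hmem : l.reverse[0] ∈ l.getLast? := by
      rw [← List.head?_reverse, List.head?_eq_getElem?, List.getElem?_eq_getElem hl]
      simp
    have := h.2.2 _ hmem
    simpa [List.getElem_reverse] using this
  rw [hd, List.reverse_reverse]

theorem pv_strip_fix (l : List Char) (h : pvNES l) : PySem.Chars.strip l = l := by
  unfold PySem.Chars.strip
  rw [pv_lstrip_fix l h, pv_rstrip_fix l h]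

theorem pv_head?_dropWhile (p : Char → Bool) (l : List Char) :
    ∀ c ∈ (List.dropWhile p l).head?, p c = false := by
  intro c hc
  have := List.head?_dropWhile_not p l
  cases hh : (List.dropWhile p l).head? with
  | none => simp [hh] at hc
  | some d => rw [hh] at this hc; simp at hc; subst hc; exact this

theorem pv_head?_prefix {p l : List Char} (hp : p <+: l) (hne : p ≠ []) : p.head? = l.head? := by
  obtain ⟨t, rfl⟩ := hp
  cases p with
  | nil => exact absurd rfl hne
  | cons a as => simp

theorem pv_NES_strip (y : List Char) (h : PySem.Chars.strip y ≠ []) : pvNES (PySem.Chars.strip y) := by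
  refine ⟨h, ?_, ?_⟩
  · have hpre : PySem.Chars.strip y <+: PySem.Chars.lstrip y := by
      unfold PySem.Chars.strip PySem.Chars.rstrip
      rw [← List.reverse_reverse (PySem.Chars.lstrip y)]
      exact List.reverse_prefix.mpr (by
        rw [List.reverse_reverse]
        exact List.dropWhile_suffix _)
    rw [pv_head?_prefix hpre h]
    unfold PySem.Chars.lstrip
    exact pv_head?_dropWhile _ _
  · intro c hc
    have : (PySem.Chars.strip y).getLast? = (List.dropWhile PySem.Chars.isspace (PySem.Chars.lstrip y).reverse).head? := by
      unfold PySem.Chars.strip PySem.Chars.rstrip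
      rw [← List.head?_reverse, List.reverse_reverse]
    rw [this] at hc
    exact pv_head?_dropWhile _ _ c hc

theorem pv_NES_append (a b : List Char) (ha : pvNES a) (hb : pvNES b) :
    pvNES (a ++ ' ' :: b) := by
  refine ⟨by simp, ?_, ?_⟩
  · intro c hc
    rw [List.head?_append_of_ne_nil _ ha.1] at hc
    exact ha.2.1 c hc
  · intro c hc
    rw [List.getLast?_append] at hc
    obtain ⟨x, xs, rfl⟩ := List.exists_cons_of_ne_nil hb.1
    rw [List.getLast?_cons_cons, Option.or_of_isSome (by simp)] at hc
    exact hb.2.2 c hc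

theorem pv_join_cons (a : List Char) (m : List (List Char)) (h : m ≠ []) :
    PySem.Chars.join [' '] (a :: m) = a ++ ' ' :: PySem.Chars.join [' '] m := by
  obtain ⟨x, xs, rfl⟩ := List.exists_cons_of_ne_nil h
  simp [PySem.Chars.join, List.intercalate]

theorem pv_join_append_singleton (l : List (List Char)) (x : List Char) :
    PySem.Chars.join [' '] (l ++ [x]) =
      if l = [] then x else PySem.Chars.join [' '] l ++ ' ' :: x := by
  induction l with
  | nil => simp [PySem.Chars.join, List.intercalate]
  | cons a l' ih =>
    rw [List.cons_append, pv_join_cons a (l' ++ [x]) (by simp), ih]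
    by_cases hl : l' = []
    · subst hl; simp [PySem.Chars.join, List.intercalate]
    · rw [if_neg hl, if_neg (by simp), pv_join_cons a l' hl]
      simp

theorem pv_NES_join (buf : List (List Char)) (h : ∀ x ∈ buf, pvNES x) (hne : buf ≠ []) :
    pvNES (PySem.Chars.join [' '] buf) := by
  induction buf with
  | nil => exact absurd rfl hne
  | cons a m ih =>
    by_cases hm : m = []
    · subst hm; simpa [PySem.Chars.join, List.intercalate] using h a (by simp)
    · rw [pv_join_cons a m hm]
      exact pv_NES_append _ _ (h a (by simp)) (ih (fun x hx => h x (by simp [hx])) hm)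

theorem pv_go_nil (cur : List Char) (acc : List (List Char)) :
    PySem.Chars.split₀.go [] cur acc =
      (if cur.isEmpty then acc.reverse else (cur.reverse :: acc).reverse) := by
  rw [PySem.Chars.split₀.go.eq_def]

theorem pv_go_cons (c : Char) (rest cur : List Char) (acc : List (List Char)) :
    PySem.Chars.split₀.go (c :: rest) cur acc =
      (if PySem.Chars.isspace c then
        (if cur.isEmpty then PySem.Chars.split₀.go rest [] acc
         else PySem.Chars.split₀.go rest [] (cur.reverse :: acc))
       else PySem.Chars.split₀.go rest (c :: cur) acc) := by
  rw [PySem.Chars.split₀.go.eq_def]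

theorem pv_go_acc (s : List Char) : ∀ (cur : List Char) (acc : List (List Char)),
    PySem.Chars.split₀.go s cur acc = acc.reverse ++ PySem.Chars.split₀.go s cur [] := by
  induction s with
  | nil =>
    intro cur acc
    rw [pv_go_nil, pv_go_nil]
    by_cases hc : cur.isEmpty
    · simp [hc]
    · simp [hc]
  | cons c rest ih =>
    intro cur acc
    rw [pv_go_cons, pv_go_cons]
    by_cases hs : PySem.Chars.isspace c
    · by_cases hc : cur.isEmpty
      · simp only [hs, hc, if_true]
        exact ih [] acc
      · simp only [hs, hc, if_true, if_false, Bool.false_eq_true]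
        rw [ih [] (cur.reverse :: acc), ih [] [cur.reverse]]
        simp
    · simp only [hs, Bool.false_eq_true, if_false]
      exact ih (c :: cur) acc

theorem pv_go_split (a : List Char) : ∀ (cur b : List Char),
    PySem.Chars.split₀.go (a ++ ' ' :: b) cur [] =
      PySem.Chars.split₀.go a cur [] ++ PySem.Chars.split₀.go b [] [] := by
  have hsp : PySem.Chars.isspace ' ' = true := by decide
  induction a with
  | nil =>
    intro cur b
    rw [List.nil_append, pv_go_cons, pv_go_nil]
    by_cases hc : cur.isEmpty
    · simp [hsp, hc]
    · rw [pv_go_acc b [] [cur.reverse]]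
      simp [hsp, hc]
  | cons c a' ih =>
    intro cur b
    rw [List.cons_append, pv_go_cons]
    conv_rhs => rw [pv_go_cons]
    by_cases hs : PySem.Chars.isspace c
    · by_cases hc : cur.isEmpty
      · simp only [hs, hc, if_true]
        exact ih [] b
      · simp only [hs, hc, if_true, if_false, Bool.false_eq_true]
        rw [pv_go_acc (a' ++ ' ' :: b) [] [cur.reverse], ih [] b,
            pv_go_acc a' [] [cur.reverse]]
        simp
    · simp only [hs, Bool.false_eq_true, if_false]
      exact ih (c :: cur) b

theorem pv_split₀_append (a b : List Char) :
    PySem.Chars.split₀ (a ++ ' ' :: b) = PySem.Chars.split₀ a ++ PySem.Chars.split₀ b := by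
  unfold PySem.Chars.split₀
  exact pv_go_split a [] b

theorem pv_str_strip_fix (s : String) (h : pvNES s.toList) : PySem.Str.strip s = s := by
  have : (PySem.Str.strip s).toList = s.toList := by
    rw [PySem.Str.toList_strip, pv_strip_fix _ h]
  exact String.toList_inj.mp this

theorem pv_toList_join (buf : List String) :
    (PySem.Str.join " " buf).toList = PySem.Chars.join [' '] (buf.map String.toList) := by
  rw [PySem.Str.toList_join]; rfl

theorem pv_wc_join_append (buf : List String) (s : String) :
    (PySem.Str.split₀ (PySem.Str.join " " (buf ++ [s]))).length =
      (PySem.Str.split₀ (PySem.Str.join " " buf)).length + (PySem.Str.split₀ s).length := by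
  unfold PySem.Str.split₀
  simp only [List.length_map]
  rw [pv_toList_join, pv_toList_join, List.map_append, List.map_cons, List.map_nil,
      pv_join_append_singleton]
  by_cases hb : buf.map String.toList = []
  · rw [if_pos hb, hb]
    simp [show PySem.Chars.join [' '] ([] : List (List Char)) = [] from by decide,
      show PySem.Chars.split₀ ([] : List Char) = [] from by decide]
  · rw [if_neg hb, pv_split₀_append]
    simp [Nat.add_comm]

theorem pv_wc_nil : 0 = (PySem.Str.split₀ (PySem.Str.join " " ([] : List String))).length := by
  unfold PySem.Str.split₀
  rw [List.length_map, pv_toList_join]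
  simp [show PySem.Chars.join [' '] ([] : List (List Char)) = [] from by decide,
    show PySem.Chars.split₀ ([] : List Char) = [] from by decide]

-- B's continuation from an open buffer `buf` with running word count `w` over stripped lines
def pvCont (buf : List String) (w : Nat) (slines : List String) : List String :=
  let p := pvTakePara slines w
  if (buf ++ p.1).isEmpty then pvBuild p.2
  else PySem.Str.join " " (buf ++ p.1) :: pvBuild p.2

theorem pv_cont_nil (slines : List String) : pvCont [] 0 slines = pvBuild slines := by
  cases slines with
  | nil => simp [pvCont, pvTakePara, pvBuild]
  | cons s rest =>
    by_cases hs : (s == "") = true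
    · have hseq : s = "" := by simpa using hs
      subst hseq
      simp [pvCont, pvTakePara]
    · have hp1 : (pvTakePara (s :: rest) 0).1 ≠ [] := by
        rw [pvTakePara, if_neg hs]
        simp only []
        split_ifs <;> simp
      simp only [pvCont, List.nil_append]
      rw [if_neg (by simpa [List.isEmpty_iff] using hp1)]
      conv_rhs => rw [pvBuild]
      simp [hs]

set_option maxHeartbeats 1000000 in
theorem pv_main (lines : List String) : ∀ (paras buf : List String),
    (∀ x ∈ buf, pvNES x.toList) →
    (let st := lines.foldl pvStepA (paras, buf);
      if st.2.isEmpty then st.1 else st.1 ++ [PySem.Str.strip (PySem.Str.join " " st.2)]) =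
    paras ++ pvCont buf ((PySem.Str.split₀ (PySem.Str.join " " buf)).length) (lines.map PySem.Str.strip) := by
  have flush : ∀ (buf : List String), (∀ x ∈ buf, pvNES x.toList) → buf ≠ [] →
      PySem.Str.strip (PySem.Str.join " " buf) = PySem.Str.join " " buf := by
    intro buf hb hne
    apply pv_str_strip_fix
    rw [pv_toList_join]
    exact pv_NES_join _ (by intro x hx; obtain ⟨y, hy, rfl⟩ := List.mem_map.mp hx; exact hb y hy)
      (by simpa using hne)
  induction lines with
  | nil =>
    intro paras buf hb
    simp only [List.foldl_nil, List.map_nil]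
    have hp : pvTakePara [] ((PySem.Str.split₀ (PySem.Str.join " " buf)).length) = ([], []) := by
      simp [pvTakePara]
    by_cases hbe : buf.isEmpty
    · have : buf = [] := by simpa [List.isEmpty_iff] using hbe
      subst this
      simp [pvCont, hp, pvBuild]
    · have hne : buf ≠ [] := by simpa [List.isEmpty_iff] using hbe
      simp only [hbe, if_false, Bool.false_eq_true]
      rw [flush buf hb hne]
      simp [pvCont, hp, hne, pvBuild]
  | cons ln rest ih =>
    intro paras buf hb
    simp only [List.foldl_cons, List.map_cons]
    by_cases hse : PySem.Str.strip ln == ""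
    · -- blank line
      have hblank : PySem.Str.strip ln = "" := by simpa using hse
      by_cases hbe : buf.isEmpty
      · have hbnil : buf = [] := by simpa [List.isEmpty_iff] using hbe
        subst hbnil
        have ha : pvStepA (paras, ([] : List String)) ln = (paras, []) := by
          simp [pvStepA, hse]
        rw [ha, ih paras [] (by simp), ← pv_wc_nil, pv_cont_nil, hblank]
        have hc : pvCont [] 0 ("" :: rest.map PySem.Str.strip) =
            pvBuild (rest.map PySem.Str.strip) := by
          simp [pvCont, pvTakePara, pvBuild]
        rw [hc]
      · have hne : buf ≠ [] := by simpa [List.isEmpty_iff] using hbe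
        have ha : pvStepA (paras, buf) ln =
            (paras ++ [PySem.Str.strip (PySem.Str.join " " buf)], ([] : List String)) := by
          simp [pvStepA, hse, hbe]
        rw [ha, ih _ [] (by simp), ← pv_wc_nil, pv_cont_nil, flush buf hb hne]
        have ht : pvTakePara ("" :: rest.map PySem.Str.strip)
            ((PySem.Str.split₀ (PySem.Str.join " " buf)).length) =
            ([], "" :: rest.map PySem.Str.strip) := by
          rw [pvTakePara]; simp
        have hc : pvCont buf ((PySem.Str.split₀ (PySem.Str.join " " buf)).length)
            (PySem.Str.strip ln :: rest.map PySem.Str.strip) =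
            PySem.Str.join " " buf :: pvBuild (rest.map PySem.Str.strip) := by
          rw [hblank]
          simp only [pvCont, ht, List.append_nil]
          rw [if_neg (by simpa [List.isEmpty_iff] using hne)]
          congr 1
          simp [pvBuild]
        rw [hc]
        simp
    · -- nonempty stripped line
      have hsne : (PySem.Str.strip ln).toList ≠ [] := by
        intro hc
        apply hse
        have : PySem.Str.strip ln = "" := String.toList_inj.mp (by rw [hc]; rfl)
        simp [this]
      have hNES : pvNES (PySem.Str.strip ln).toList := by
        rw [PySem.Str.toList_strip] at hsne ⊢
        exact pv_NES_strip _ hsne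
      have hb1 : ∀ x ∈ buf ++ [PySem.Str.strip ln], pvNES x.toList := by
        intro x hx
        rcases List.mem_append.mp hx with h1 | h1
        · exact hb x h1
        · simp at h1; subst h1; exact hNES
      set s := PySem.Str.strip ln with hsdef
      set w := (PySem.Str.split₀ (PySem.Str.join " " buf)).length with hwdef
      have hw1 : (PySem.Str.split₀ (PySem.Str.join " " (buf ++ [s]))).length =
          w + (PySem.Str.split₀ s).length := by
        rw [pv_wc_join_append]
      have hEcond : ((PySem.Str.endswith s "." || PySem.Str.endswith s "?" ||
           PySem.Str.endswith s "!" || PySem.Str.endswith s ":") &&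
          decide ((PySem.Str.split₀ (PySem.Str.join " " (buf ++ [s]))).length ≥ 15)) =
          (pvEndsB s && decide (w + (PySem.Str.split₀ s).length ≥ 15)) := by
        rw [hw1]; rfl
      have htp : pvTakePara (s :: rest.map PySem.Str.strip) w =
          (if pvEndsB s && decide (w + (PySem.Str.split₀ s).length ≥ 15) then
            ([s], rest.map PySem.Str.strip)
          else
            let p := pvTakePara (rest.map PySem.Str.strip) (w + (PySem.Str.split₀ s).length)
            (s :: p.1, p.2)) := by
        rw [pvTakePara]
        simp [hse]
      by_cases hcond : (pvEndsB s && decide (w + (PySem.Str.split₀ s).length ≥ 15)) = true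
      · have ha : pvStepA (paras, buf) ln =
            (paras ++ [PySem.Str.strip (PySem.Str.join " " (buf ++ [s]))], ([] : List String)) := by
          simp only [pvStepA]
          rw [if_neg (by simpa using hse), ← hsdef, hEcond, if_pos hcond]
        rw [ha, ih _ [] (by simp), ← pv_wc_nil, pv_cont_nil,
            flush (buf ++ [s]) hb1 (by simp)]
        have : pvCont buf w (s :: rest.map PySem.Str.strip) =
            PySem.Str.join " " (buf ++ [s]) :: pvBuild (rest.map PySem.Str.strip) := by
          simp only [pvCont, htp, if_pos hcond]
          have : (buf ++ [s]) ≠ [] := by simp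
          simp [this]
        rw [this]
        simp
      · have ha : pvStepA (paras, buf) ln = (paras, buf ++ [s]) := by
          simp only [pvStepA]
          rw [if_neg (by simpa using hse), ← hsdef, hEcond, if_neg hcond]
        rw [ha, ih _ (buf ++ [s]) hb1, hw1]
        have : pvCont buf w (s :: rest.map PySem.Str.strip) =
            pvCont (buf ++ [s]) (w + (PySem.Str.split₀ s).length) (rest.map PySem.Str.strip) := by
          simp only [pvCont, htp, if_neg hcond]
          have h1 : (buf ++ s :: (pvTakePara (rest.map PySem.Str.strip) (w + (PySem.Str.split₀ s).length)).1) ≠ [] := by simp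
          have h2 : ((buf ++ [s]) ++ (pvTakePara (rest.map PySem.Str.strip) (w + (PySem.Str.split₀ s).length)).1) ≠ [] := by simp
          simp only [List.isEmpty_iff, h1, h2, if_false]
          rw [List.append_assoc]
          rfl
        rw [this]

-- ===== VERDICT (by name: the statement is the Claim_ definition above) =====
theorem coalesce_lines_py_spec : Claim_equal_coalesce_lines_py := by
  intro lines _hdom
  unfold Spec_coalesce_lines_py coalesce_lines_py coalesce_lines_py_alt
  rw [pv_main lines [] [] (by simp), ← pv_wc_nil, pv_cont_nil]
  simp
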